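-- pv_equiv track=rewrite | github.com/Qiul0/Digital-Image-Processing | Image_restoration/self_adapt_filter.py | statistic_filter
-- ===== SOURCE A (Python) =====
-- def median(list):
--     list = sorted(list)
--     n = len(list)
--     if n % 2 == 0:
--         return (list[int(n/2-1)] + list[int(n/2)]) / 2
--     else:
--         return list[int(n/2)]
--
-- def statistic_filter(x, y, h, w, img, kernel_size):
--     left = int(kernel_size / 2)
--     right = kernel_size - left
--     list = []
--     for i in range(x - left, x + right):
--         for j in range(y - left, y + right):
--             if (i >= 0 and i < h and j >= 0 and j < w):
--                 list.append(img[i][j])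
--     return min(list), int(median(list)), max(list)
-- ===== SOURCE B (Python) =====
-- def statistic_filter(x, y, h, w, img, kernel_size):
--     left = int(kernel_size / 2)
--     right = kernel_size - left
--     s = []
--     for i in range(x - left, x + right):
--         if 0 <= i < h:
--             row = img[i]
--             for j in range(y - left, y + right):
--                 if 0 <= j < w:
--                     v = row[j]
--                     k = 0
--                     while k < len(s) and s[k] <= v:
--                         k += 1
--                     s.insert(k, v)
--     n = len(s)
--     if n % 2:
--         med = s[n // 2]
--     else:
--         med = int((s[n // 2 - 1] + s[n // 2]) / 2)
--     return s[0], med, s[-1]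
-- ===== Notes on version B (the rewrite author's own statement) =====
-- stated objective: alternative
-- what changed: B keeps a single ordered accumulator, inserting each window value at its sorted position as it is gathered (online insertion sort), then reads min, median and max by indexing; A gathers an unordered list, runs separate min and max scans and a median helper that sorts.
import Mathlib
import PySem

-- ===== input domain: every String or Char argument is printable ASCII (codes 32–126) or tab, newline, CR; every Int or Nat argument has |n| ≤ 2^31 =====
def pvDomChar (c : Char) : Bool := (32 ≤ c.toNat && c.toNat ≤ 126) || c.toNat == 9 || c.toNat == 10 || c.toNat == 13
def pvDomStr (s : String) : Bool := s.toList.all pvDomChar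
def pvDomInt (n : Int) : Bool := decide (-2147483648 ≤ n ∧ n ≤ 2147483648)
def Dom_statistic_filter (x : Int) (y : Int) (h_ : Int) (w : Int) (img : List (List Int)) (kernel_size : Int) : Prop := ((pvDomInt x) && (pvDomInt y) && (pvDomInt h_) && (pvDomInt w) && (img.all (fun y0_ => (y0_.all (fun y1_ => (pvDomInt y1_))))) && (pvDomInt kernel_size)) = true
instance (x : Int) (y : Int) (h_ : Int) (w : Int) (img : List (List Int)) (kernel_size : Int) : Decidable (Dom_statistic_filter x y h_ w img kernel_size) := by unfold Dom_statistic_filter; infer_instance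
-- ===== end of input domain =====

-- B replaces A's gather-then-sort-plus-min/max-scans with ONE ordered accumulator: each window
-- value is inserted at its sorted position while gathering, and min/median/max are read by index.

-- ===== PORT A =====
-- median helper of A: sorts, then the even/odd rule.  int(n/2-1), int(n/2) and int((a+b)/2)
-- are exact as truncating division on this domain (|values| ≤ 2^31, so a+b and n/2 are exact
-- half-integers in float and int() truncates toward zero = PySem.Int.truncdiv).
def medianA (l : List Int) : Int :=
  let s := PySem.List.sorted l (fun v => v) false
  let n : Int := (l.length : Int)
  if PySem.Int.mod n 2 == 0 then
    PySem.Int.truncdiv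
      (PySem.List.pyGetD s (PySem.Int.truncdiv n 2 - 1) 0 + PySem.List.pyGetD s (PySem.Int.truncdiv n 2) 0) 2
  else
    PySem.List.pyGetD s (PySem.Int.truncdiv n 2) 0

def statistic_filter (x : Int) (y : Int) (h_ : Int) (w : Int) (img : List (List Int)) (kernel_size : Int) : Int × Int × Int :=
  let left := PySem.Int.truncdiv kernel_size 2   -- int(kernel_size / 2): exact (half-integer float, trunc toward zero)
  let right := kernel_size - left
  let lst := (PySem.List.pyRange (x - left) (x + right) 1).foldl (fun acc i =>
      (PySem.List.pyRange (y - left) (y + right) 1).foldl (fun acc2 j =>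
        if decide (0 ≤ i ∧ i < h_ ∧ 0 ≤ j ∧ j < w) = true then
          acc2 ++ [PySem.List.pyGetD (PySem.List.pyGetD img i []) j 0]   -- img[i][j]; Pre_ guarantees in range
        else acc2) acc) []
  ((PySem.List.min? lst (fun v => v)).getD 0,   -- min(lst); Pre_ guarantees lst ≠ []
   medianA lst,
   (PySem.List.max? lst (fun v => v)).getD 0)

-- ===== PORT B =====
-- the hand-written ordered insert of Source B: scan past the elements ≤ v, insert v there
def insertAsc (v : Int) : List Int → List Int
  | [] => [v]
  | a :: t => if a ≤ v then a :: insertAsc v t else v :: a :: t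

def statistic_filter_alt (x : Int) (y : Int) (h_ : Int) (w : Int) (img : List (List Int)) (kernel_size : Int) : Int × Int × Int :=
  let left := PySem.Int.truncdiv kernel_size 2
  let right := kernel_size - left
  let s := (PySem.List.pyRange (x - left) (x + right) 1).foldl (fun s i =>
      if decide (0 ≤ i ∧ i < h_) = true then
        let row := PySem.List.pyGetD img i []   -- img[i]; Pre_ guarantees in range
        (PySem.List.pyRange (y - left) (y + right) 1).foldl (fun s j =>
          if decide (0 ≤ j ∧ j < w) = true then insertAsc (PySem.List.pyGetD row j 0) s else s) s
      else s) []
  let n : Int := (s.length : Int)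
  let med := if PySem.Int.mod n 2 == 1 then
      PySem.List.pyGetD s (PySem.Int.floordiv n 2) 0
    else
      PySem.Int.truncdiv
        (PySem.List.pyGetD s (PySem.Int.floordiv n 2 - 1) 0 + PySem.List.pyGetD s (PySem.Int.floordiv n 2) 0) 2
  (PySem.List.pyGetD s 0 0, med, PySem.List.pyGetD s (-1) 0)

-- ===== PRECONDITION & SPEC =====
-- Pre_ excludes exactly the inputs where Python A raises: an empty neighborhood window
-- (min([]) is a ValueError) or a bounds-passing index outside the ragged img (IndexError).
-- Stated by interval arithmetic (the window indices form the intervals [ilo,ihi) x [jlo,jhi)).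
def Pre_statistic_filter (x : Int) (y : Int) (h_ : Int) (w : Int) (img : List (List Int)) (kernel_size : Int) : Prop :=
  let left := PySem.Int.truncdiv kernel_size 2
  let right := kernel_size - left
  let ilo := max (x - left) 0
  let ihi := min (x + right) h_
  let jlo := max (y - left) 0
  let jhi := min (y + right) w
  ilo < ihi ∧ jlo < jhi ∧ ihi ≤ (img.length : Int) ∧
    ∀ i ∈ List.range img.length, (ilo ≤ (i : Int) ∧ (i : Int) < ihi) →
      jhi ≤ ((img.getD i []).length : Int)
instance (x : Int) (y : Int) (h_ : Int) (w : Int) (img : List (List Int)) (kernel_size : Int) : Decidable (Pre_statistic_filter x y h_ w img kernel_size) := by unfold Pre_statistic_filter; infer_instance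

def pvWitness_statistic_filter : Int × Int × Int × Int × List (List Int) × Int := (0, 0, 2, 2, [[1, 2], [3, 4]], 3)

def Spec_statistic_filter (x : Int) (y : Int) (h_ : Int) (w : Int) (img : List (List Int)) (kernel_size : Int) (out : Int × Int × Int) : Prop := out = statistic_filter_alt x y h_ w img kernel_size
instance (x : Int) (y : Int) (h_ : Int) (w : Int) (img : List (List Int)) (kernel_size : Int) (out : Int × Int × Int) : Decidable (Spec_statistic_filter x y h_ w img kernel_size out) := by unfold Spec_statistic_filter; infer_instance

-- ===== CLAIM (what is proved, stated in full; the proofs are below) =====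
def Claim_equal_statistic_filter : Prop := ∀ (x : Int) (y : Int) (h_ : Int) (w : Int) (img : List (List Int)) (kernel_size : Int), Dom_statistic_filter x y h_ w img kernel_size → Pre_statistic_filter x y h_ w img kernel_size → Spec_statistic_filter x y h_ w img kernel_size (statistic_filter x y h_ w img kernel_size)

-- ===== LEMMAS AND PROOFS =====

theorem pvWitness_ok :
    Dom_statistic_filter pvWitness_statistic_filter.1 pvWitness_statistic_filter.2.1
      pvWitness_statistic_filter.2.2.1 pvWitness_statistic_filter.2.2.2.1
      pvWitness_statistic_filter.2.2.2.2.1 pvWitness_statistic_filter.2.2.2.2.2 ∧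
    Pre_statistic_filter pvWitness_statistic_filter.1 pvWitness_statistic_filter.2.1
      pvWitness_statistic_filter.2.2.1 pvWitness_statistic_filter.2.2.2.1
      pvWitness_statistic_filter.2.2.2.2.1 pvWitness_statistic_filter.2.2.2.2.2 := by
  decide

-- insertAsc is a permutation-preserving sorted insert
theorem insertAsc_perm (v : Int) (l : List Int) : (insertAsc v l).Perm (v :: l) := by
  induction l with
  | nil => simp [insertAsc]
  | cons a t ih =>
      by_cases h : a ≤ v
      · simp only [insertAsc, if_pos h]
        exact (ih.cons a).trans (List.Perm.swap v a t)
      · simp [insertAsc, if_neg h]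

theorem insertAsc_pairwise (v : Int) (l : List Int) (hl : l.Pairwise (· ≤ ·)) :
    (insertAsc v l).Pairwise (· ≤ ·) := by
  induction l with
  | nil => simp [insertAsc]
  | cons a t ih =>
      rcases List.pairwise_cons.mp hl with ⟨ha, ht⟩
      by_cases h : a ≤ v
      · simp only [insertAsc, if_pos h]
        refine List.pairwise_cons.mpr ⟨?_, ih ht⟩
        intro b hb
        rcases List.mem_cons.mp (((insertAsc_perm v t).mem_iff).mp hb) with rfl | hbt
        · exact h
        · exact ha b hbt
      · simp only [insertAsc, if_neg h]
        refine List.pairwise_cons.mpr ⟨?_, hl⟩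
        intro b hb
        rcases List.mem_cons.mp hb with rfl | hbt
        · omega
        · exact le_trans (by omega) (ha b hbt)

-- the insertion fold is a sorted permutation of acc ++ l
theorem foldl_insertAsc_perm (l acc : List Int) :
    (l.foldl (fun s v => insertAsc v s) acc).Perm (acc ++ l) := by
  induction l generalizing acc with
  | nil => simp
  | cons a t ih =>
      simp only [List.foldl_cons]
      refine (ih (insertAsc a acc)).trans ?_
      have h1 : (insertAsc a acc ++ t).Perm ((a :: acc) ++ t) :=
        (insertAsc_perm a acc).append_right t
      refine h1.trans ?_
      simpa using (List.perm_middle (a := a) (l₁ := acc) (l₂ := t)).symm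

theorem foldl_insertAsc_pairwise (l acc : List Int) (h : acc.Pairwise (· ≤ ·)) :
    (l.foldl (fun s v => insertAsc v s) acc).Pairwise (· ≤ ·) := by
  induction l generalizing acc with
  | nil => exact h
  | cons a t ih => exact ih _ (insertAsc_pairwise a acc h)

-- hence it IS Python's sorted of the gathered values
theorem foldl_insertAsc_eq_sorted (l : List Int) :
    l.foldl (fun s v => insertAsc v s) [] = PySem.List.sorted l (fun v => v) false := by
  refine (PySem.List.sorted_id_eq_of_perm_of_pairwise _ _ ?_ ?_).symm
  · simpa using foldl_insertAsc_perm l []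
  · exact foldl_insertAsc_pairwise l [] (by simp)

-- a filtered flatMap absorbs the filter into the body
theorem flatMap_filter_eq_ite {α β : Type} (p : α → Bool) (g : α → List β) (l : List α) :
    (l.filter p).flatMap g = l.flatMap (fun i => if p i = true then g i else []) := by
  induction l with
  | nil => rfl
  | cons a t ih =>
      by_cases h : p a = true <;> simp [List.flatMap_cons, h, ih]

-- the first element of a sorted list is min of the original list
theorem min_getD_eq_sorted_head (l : List Int) (hl : l ≠ []) :
    (PySem.List.min? l (fun v => v)).getD 0 = PySem.List.pyGetD (PySem.List.sorted l (fun v => v) false) 0 0 := by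
  obtain ⟨v, hv⟩ : ∃ v, PySem.List.min? l (fun v => v) = some v := by
    cases h : PySem.List.min? l (fun v => v) with
    | none => exact absurd ((PySem.List.min?_eq_none_iff _ _).mp h) hl
    | some v => exact ⟨v, rfl⟩
  have hvmem := PySem.List.min?_mem hv
  have hvmin := PySem.List.min?_isMin hv
  cases hs : PySem.List.sorted l (fun v => v) false with
  | nil => exact absurd ((PySem.List.sorted_eq_nil_iff _ _ _).mp hs) hl
  | cons m t =>
      have hmmem : m ∈ l := by
        have := (PySem.List.sorted_perm l (fun v => v) false).mem_iff (a := m)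
        rw [hs] at this
        exact this.mp List.mem_cons_self
      have h1 : m ≤ v := PySem.List.key_head_sorted_le l (fun v => v) hs v hvmem
      have h2 : v ≤ m := hvmin m hmmem
      rw [hv, PySem.List.pyGetD_zero_cons]
      simp only [Option.getD_some]
      exact le_antisymm h2 h1

-- the last element of a sorted list is max of the original list
theorem max_getD_eq_sorted_last (l : List Int) (hl : l ≠ []) :
    (PySem.List.max? l (fun v => v)).getD 0 = PySem.List.pyGetD (PySem.List.sorted l (fun v => v) false) (-1) 0 := by
  obtain ⟨v, hv⟩ : ∃ v, PySem.List.max? l (fun v => v) = some v := by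
    cases h : PySem.List.max? l (fun v => v) with
    | none => exact absurd ((PySem.List.max?_eq_none_iff _ _).mp h) hl
    | some v => exact ⟨v, rfl⟩
  have hvmem := PySem.List.max?_mem hv
  have hvmax := PySem.List.max?_isMax hv
  have hsne : PySem.List.sorted l (fun v => v) false ≠ [] := by
    simpa [PySem.List.sorted_eq_nil_iff] using hl
  rw [hv, PySem.List.pyGetD_neg_one _ _ hsne]
  set s := PySem.List.sorted l (fun v => v) false with hsdef
  have hlast_mem : s.getLast hsne ∈ l := by
    have := (PySem.List.sorted_perm l (fun v => v) false).mem_iff (a := s.getLast hsne)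
    rw [← hsdef] at this
    exact this.mp (List.getLast_mem hsne)
  have h1 : s.getLast hsne ≤ v := hvmax _ hlast_mem
  have hvs : v ∈ s := by
    have := (PySem.List.sorted_perm l (fun v => v) false).mem_iff (a := v)
    rw [← hsdef] at this
    exact this.mpr hvmem
  obtain ⟨p, hp, hpe⟩ := List.mem_iff_getElem.mp hvs
  have hlen : 0 < s.length := List.length_pos_iff.mpr hsne
  have h2 : v ≤ s.getLast hsne := by
    rw [List.getLast_eq_getElem]
    rw [← hpe]
    have := PySem.List.sorted_id_getElem_mono (xs := l) (p := p) (q := s.length - 1)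
      (by omega) (by rw [← hsdef]; omega)
    simpa [← hsdef] using this
  exact le_antisymm h2 h1

-- A's gathered window as a flatMap of the in-bounds indices
theorem gather_eq (x y h_ w : Int) (img : List (List Int)) (left right : Int) :
    (PySem.List.pyRange (x - left) (x + right) 1).foldl (fun acc i =>
      (PySem.List.pyRange (y - left) (y + right) 1).foldl (fun acc2 j =>
        if decide (0 ≤ i ∧ i < h_ ∧ 0 ≤ j ∧ j < w) = true then
          acc2 ++ [PySem.List.pyGetD (PySem.List.pyGetD img i []) j 0]
        else acc2) acc) [] =
    ((PySem.List.pyRange (x - left) (x + right) 1).filter (fun i => decide (0 ≤ i ∧ i < h_))).flatMap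
      (fun i => ((PySem.List.pyRange (y - left) (y + right) 1).filter (fun j => decide (0 ≤ j ∧ j < w))).map
        (fun j => PySem.List.pyGetD (PySem.List.pyGetD img i []) j 0)) := by
  have hinner : ∀ (i : Int) (acc : List Int),
      (PySem.List.pyRange (y - left) (y + right) 1).foldl (fun acc2 j =>
        if decide (0 ≤ i ∧ i < h_ ∧ 0 ≤ j ∧ j < w) = true then
          acc2 ++ [PySem.List.pyGetD (PySem.List.pyGetD img i []) j 0]
        else acc2) acc =
      acc ++ (if decide (0 ≤ i ∧ i < h_) = true then
        ((PySem.List.pyRange (y - left) (y + right) 1).filter (fun j => decide (0 ≤ j ∧ j < w))).map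
          (fun j => PySem.List.pyGetD (PySem.List.pyGetD img i []) j 0) else []) := by
    intro i acc
    by_cases hi : 0 ≤ i ∧ i < h_
    · rw [if_pos (by simpa using hi)]
      have := PySem.List.foldl_append_if (fun j => decide (0 ≤ i ∧ i < h_ ∧ 0 ≤ j ∧ j < w))
        (fun j => PySem.List.pyGetD (PySem.List.pyGetD img i []) j 0)
        (PySem.List.pyRange (y - left) (y + right) 1) acc
      rw [this]
      congr 1
      · congr 1
        apply List.filter_congr
        intro j _
        simp [hi.1, hi.2]
    · rw [if_neg (by simpa using hi)]
      have hbody : ∀ (acc2 : List Int) (j : Int),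
          (if decide (0 ≤ i ∧ i < h_ ∧ 0 ≤ j ∧ j < w) = true then
            acc2 ++ [PySem.List.pyGetD (PySem.List.pyGetD img i []) j 0]
          else acc2) = acc2 := by
        intro acc2 j
        rw [if_neg]
        simp only [decide_eq_true_eq]
        intro h
        exact hi ⟨h.1, h.2.1⟩
      rw [PySem.List.foldl_congr_mem _ _ _ _ (fun acc2 j _ => hbody acc2 j)]
      simp [List.foldl_fixed']
  calc (PySem.List.pyRange (x - left) (x + right) 1).foldl (fun acc i =>
          (PySem.List.pyRange (y - left) (y + right) 1).foldl (fun acc2 j =>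
            if decide (0 ≤ i ∧ i < h_ ∧ 0 ≤ j ∧ j < w) = true then
              acc2 ++ [PySem.List.pyGetD (PySem.List.pyGetD img i []) j 0]
            else acc2) acc) []
      = (PySem.List.pyRange (x - left) (x + right) 1).foldl (fun acc i =>
          acc ++ (if decide (0 ≤ i ∧ i < h_) = true then
            ((PySem.List.pyRange (y - left) (y + right) 1).filter (fun j => decide (0 ≤ j ∧ j < w))).map
              (fun j => PySem.List.pyGetD (PySem.List.pyGetD img i []) j 0) else [])) [] := by
        exact PySem.List.foldl_congr_mem _ _ _ _ (fun acc i _ => hinner i acc)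
    _ = (PySem.List.pyRange (x - left) (x + right) 1).flatMap
          (fun i => (if decide (0 ≤ i ∧ i < h_) = true then
            ((PySem.List.pyRange (y - left) (y + right) 1).filter (fun j => decide (0 ≤ j ∧ j < w))).map
              (fun j => PySem.List.pyGetD (PySem.List.pyGetD img i []) j 0) else [])) := by
        simpa using PySem.List.foldl_append_eq_flatMap
          (fun i => (if decide (0 ≤ i ∧ i < h_) = true then
            ((PySem.List.pyRange (y - left) (y + right) 1).filter (fun j => decide (0 ≤ j ∧ j < w))).map
              (fun j => PySem.List.pyGetD (PySem.List.pyGetD img i []) j 0) else []))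
          (PySem.List.pyRange (x - left) (x + right) 1) []
    _ = _ := (flatMap_filter_eq_ite _ _ _).symm

-- a guarded insert fold is the insert fold over the filtered, mapped values
theorem foldl_insert_filter {α : Type} (p : α → Bool) (f : α → Int) (l : List α) (s : List Int) :
    l.foldl (fun s j => if p j = true then insertAsc (f j) s else s) s =
    ((l.filter p).map f).foldl (fun s v => insertAsc v s) s := by
  induction l generalizing s with
  | nil => rfl
  | cons a t ih =>
      by_cases h : p a = true <;> simp [List.filter_cons, h, ih]

-- a fold over a flatMap is the nested fold
theorem foldl_flatMap_eq {α β σ : Type} (g : σ → β → σ) (f : α → List β) (l : List α) (s : σ) :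
    (l.flatMap f).foldl g s = l.foldl (fun s i => (f i).foldl g s) s := by
  induction l generalizing s with
  | nil => rfl
  | cons a t ih => simp [List.flatMap_cons, List.foldl_append, ih]

-- B's nested loop builds the insert fold of the flatMapped window
theorem gatherB_eq (x y h_ w : Int) (img : List (List Int)) (left right : Int) :
    (PySem.List.pyRange (x - left) (x + right) 1).foldl (fun s i =>
      if decide (0 ≤ i ∧ i < h_) = true then
        (PySem.List.pyRange (y - left) (y + right) 1).foldl (fun s j =>
          if decide (0 ≤ j ∧ j < w) = true then
            insertAsc (PySem.List.pyGetD (PySem.List.pyGetD img i []) j 0) s else s) s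
      else s) [] =
    (((PySem.List.pyRange (x - left) (x + right) 1).filter (fun i => decide (0 ≤ i ∧ i < h_))).flatMap
      (fun i => ((PySem.List.pyRange (y - left) (y + right) 1).filter (fun j => decide (0 ≤ j ∧ j < w))).map
        (fun j => PySem.List.pyGetD (PySem.List.pyGetD img i []) j 0))).foldl
      (fun s v => insertAsc v s) [] := by
  rw [foldl_flatMap_eq]
  have h1 : ∀ (s : List Int),
      ((PySem.List.pyRange (x - left) (x + right) 1).filter (fun i => decide (0 ≤ i ∧ i < h_))).foldl
        (fun s i => (((PySem.List.pyRange (y - left) (y + right) 1).filter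
            (fun j => decide (0 ≤ j ∧ j < w))).map
          (fun j => PySem.List.pyGetD (PySem.List.pyGetD img i []) j 0)).foldl
          (fun s v => insertAsc v s) s) s =
      (PySem.List.pyRange (x - left) (x + right) 1).foldl
        (fun s i => if decide (0 ≤ i ∧ i < h_) = true then
          (((PySem.List.pyRange (y - left) (y + right) 1).filter
              (fun j => decide (0 ≤ j ∧ j < w))).map
            (fun j => PySem.List.pyGetD (PySem.List.pyGetD img i []) j 0)).foldl
            (fun s v => insertAsc v s) s
        else s) s := by
    intro s
    induction (PySem.List.pyRange (x - left) (x + right) 1) generalizing s with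
    | nil => rfl
    | cons a t ih =>
        by_cases h : decide (0 ≤ a ∧ a < h_) = true
        · rw [List.filter_cons, if_pos h, List.foldl_cons, List.foldl_cons, if_pos h, ih]
        · rw [List.filter_cons, if_neg h, List.foldl_cons, if_neg h, ih]
  rw [h1]
  apply PySem.List.foldl_congr_mem
  intro s i _
  by_cases h : decide (0 ≤ i ∧ i < h_) = true
  · rw [if_pos h, if_pos h, foldl_insert_filter]
  · rw [if_neg h, if_neg h]

-- the two even/odd median computations agree on the same sorted list
theorem median_eq (l : List Int) :
    medianA l =
      (let s := PySem.List.sorted l (fun v => v) false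
       let n : Int := (s.length : Int)
       if PySem.Int.mod n 2 == 1 then
         PySem.List.pyGetD s (PySem.Int.floordiv n 2) 0
       else
         PySem.Int.truncdiv
           (PySem.List.pyGetD s (PySem.Int.floordiv n 2 - 1) 0 + PySem.List.pyGetD s (PySem.Int.floordiv n 2) 0) 2) := by
  unfold medianA
  have hlen : ((PySem.List.sorted l (fun v => v) false).length : Int) = (l.length : Int) := by
    rw [PySem.List.length_sorted]
  simp only [hlen]
  have hmod : PySem.Int.mod (l.length : Int) 2 = ((l.length % 2 : Nat) : Int) :=
    PySem.Int.mod_natCast _ _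
  have hdiv : PySem.Int.floordiv (l.length : Int) 2 = ((l.length / 2 : Nat) : Int) :=
    PySem.Int.floordiv_natCast _ _
  have htdiv : PySem.Int.truncdiv (l.length : Int) 2 = ((l.length / 2 : Nat) : Int) := by
    have h0 : (0 : Int) ≤ (l.length : Int) := by positivity
    have ht : (l.length : Int).tdiv 2 = (l.length : Int) / 2 := Int.tdiv_eq_ediv_of_nonneg h0
    simp only [PySem.Int.truncdiv, ht]
    omega
  rcases Nat.even_or_odd l.length with he | ho
  · have h2 : l.length % 2 = 0 := Nat.even_iff.mp he
    rw [if_pos (by simp; omega), if_neg (by simp; omega), htdiv, hdiv]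
  · have h2 : l.length % 2 = 1 := Nat.odd_iff.mp ho
    rw [if_neg (by simp; omega), if_pos (by simp; omega), htdiv, hdiv]

-- ===== VERDICT (by name: the statement is the Claim_ definition above) =====
theorem statistic_filter_spec : Claim_equal_statistic_filter := by
  intro x y h_ w img kernel_size _hdom hpre
  unfold Spec_statistic_filter statistic_filter statistic_filter_alt
  simp only []
  rw [gather_eq, gatherB_eq, foldl_insertAsc_eq_sorted]
  set vals := ((PySem.List.pyRange (x - PySem.Int.truncdiv kernel_size 2)
      (x + (kernel_size - PySem.Int.truncdiv kernel_size 2)) 1).filter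
        (fun i => decide (0 ≤ i ∧ i < h_))).flatMap
      (fun i => ((PySem.List.pyRange (y - PySem.Int.truncdiv kernel_size 2)
        (y + (kernel_size - PySem.Int.truncdiv kernel_size 2)) 1).filter
          (fun j => decide (0 ≤ j ∧ j < w))).map
        (fun j => PySem.List.pyGetD (PySem.List.pyGetD img i []) j 0)) with hvals
  have hne : vals ≠ [] := by
    unfold Pre_statistic_filter at hpre
    simp only [] at hpre
    obtain ⟨hii, hjj, -, -⟩ := hpre
    set left := PySem.Int.truncdiv kernel_size 2 with hleft
    have hi0 : (max (x - left) 0) ∈ (PySem.List.pyRange (x - left) (x + (kernel_size - left)) 1).filter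
        (fun i => decide (0 ≤ i ∧ i < h_)) := by
      rw [List.mem_filter]
      constructor
      · rw [PySem.List.mem_pyRange_one]; omega
      · simp only [decide_eq_true_eq]; omega
    have hj0 : (max (y - left) 0) ∈ (PySem.List.pyRange (y - left) (y + (kernel_size - left)) 1).filter
        (fun j => decide (0 ≤ j ∧ j < w)) := by
      rw [List.mem_filter]
      constructor
      · rw [PySem.List.mem_pyRange_one]; omega
      · simp only [decide_eq_true_eq]; omega
    rw [hvals]
    simp only [ne_eq, List.flatMap_eq_nil_iff, not_forall]
    exact ⟨_, hi0, by simp only [List.map_eq_nil_iff]; exact List.ne_nil_of_mem hj0⟩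
  rw [min_getD_eq_sorted_head vals hne, max_getD_eq_sorted_last vals hne, median_eq]
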